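-- pv_equiv track=rewrite | github.com/dlwltn98/practiceCodingTest | basic/basic00.py | solution
-- ===== SOURCE A (Python) =====
-- def solution(hp):
--     answer = 0
--     ants = [5, 3, 1]
--
--     for i in ants :
--         answer += hp//i
--         hp = hp%i
--         if hp == 0 :
--             break
--     return answer
-- ===== SOURCE B (Python) =====
-- def solution(hp):
--     q, r = divmod(hp, 5)
--     return q + (0, 1, 2, 1, 2)[r]
-- ===== Notes on version B (the rewrite author's own statement) =====
-- stated objective: alternative
-- what changed: Replaced the greedy division cascade over the ant sizes 3 and 1 (A's loop with early break) by a single divmod by 5 plus a precomputed 5-entry residue table giving the ant count for each remainder.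
import Mathlib
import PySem

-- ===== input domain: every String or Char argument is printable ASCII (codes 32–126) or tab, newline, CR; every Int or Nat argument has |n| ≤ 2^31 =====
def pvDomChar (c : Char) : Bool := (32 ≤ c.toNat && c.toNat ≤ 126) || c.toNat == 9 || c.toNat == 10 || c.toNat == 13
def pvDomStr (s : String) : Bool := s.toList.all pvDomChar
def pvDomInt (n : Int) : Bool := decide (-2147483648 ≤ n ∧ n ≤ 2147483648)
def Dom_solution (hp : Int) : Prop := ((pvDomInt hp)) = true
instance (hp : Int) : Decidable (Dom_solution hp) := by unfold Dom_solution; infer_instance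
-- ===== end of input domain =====

-- B replaces A's greedy loop over [5,3,1] by one divmod by 5 and a 5-entry residue table; return values only.
-- ===== PORT A =====
def solutionGo : List Int → Int → Int → Int
  | [], _, answer => answer
  | i :: rest, hp, answer =>
      let answer := answer + PySem.Int.floordiv hp i
      let hp := PySem.Int.mod hp i
      if hp = 0 then answer else solutionGo rest hp answer

def solution (hp : Int) : Int := solutionGo [5, 3, 1] hp 0

-- ===== PORT B =====
-- divmod(hp, 5): divisor is the nonzero literal 5, so divmod? is `some`; .getD is exact here.
-- (0,1,2,1,2)[r]: r = hp mod 5 ∈ [0,5), so pyGet? is `some`; .getD 0 is exact here.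
def solution_alt (hp : Int) : Int :=
  let qr := (PySem.Int.divmod? hp 5).getD (0, 0)
  qr.1 + (PySem.List.pyGet? [0, 1, 2, 1, 2] qr.2).getD 0

-- ===== PRECONDITION & SPEC =====
def Spec_solution (hp : Int) (out : Int) : Prop := out = solution_alt hp
instance (hp : Int) (out : Int) : Decidable (Spec_solution hp out) := by unfold Spec_solution; infer_instance

-- ===== CLAIM (what is proved, stated in full; the proofs are below) =====
def Claim_equal_solution : Prop := ∀ (hp : Int), Dom_solution hp → Spec_solution hp (solution hp)

-- ===== LEMMAS AND PROOFS =====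

-- ===== VERDICT =====
theorem solution_spec : Claim_equal_solution := by
  intro hp _
  have h5 : (0:Int) < 5 := by norm_num
  simp only [Spec_solution, solution, solution_alt, solutionGo, PySem.Int.divmod?,
    PySem.Int.mod_eq_emod_of_pos h5,
    PySem.Int.mod_eq_emod_of_pos (show (0:Int) < 3 by norm_num),
    PySem.Int.mod_eq_emod_of_pos (show (0:Int) < 1 by norm_num),
    PySem.Int.floordiv_eq_ediv_of_pos h5,
    PySem.Int.floordiv_eq_ediv_of_pos (show (0:Int) < 3 by norm_num),
    PySem.Int.floordiv_eq_ediv_of_pos (show (0:Int) < 1 by norm_num)]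
  rw [Int.fdiv_eq_ediv_of_nonneg _ (by norm_num : (0:Int) ≤ 5),
    (by rw [Int.fmod_eq_emod]; norm_num : hp.fmod 5 = hp % 5)]
  have hcase : hp % 5 = 0 ∨ hp % 5 = 1 ∨ hp % 5 = 2 ∨ hp % 5 = 3 ∨ hp % 5 = 4 := by omega
  rcases hcase with h|h|h|h|h <;> rw [h] <;>
    simp [PySem.List.pyGet?, PySem.List.pyIdx?] <;> omega
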